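-- pv_equiv track=rewrite | github.com/amshrestha2020/CodeSignal | CodeSignal/Core/IncreaseNumberRoundness.py | solution
-- ===== SOURCE A (Python) =====
-- def solution(n):
--     # Convert integer to string for easier manipulation
--     n_str = str(n)
--
--     # Find the rightmost non-zero digit
--     rightmost_non_zero_index = len(n_str) - 1
--     while rightmost_non_zero_index >= 0 and n_str[rightmost_non_zero_index] == '0':
--         rightmost_non_zero_index -= 1
--
--     # Check if there is at least one zero digit to the left of the rightmost non-zero digit
--     for i in range(rightmost_non_zero_index):
--         if n_str[i] == '0':
--             return True  # Roundness can be increased by swapping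
--     return False  # Roundness cannot be increased
-- ===== SOURCE B (Python) =====
-- def solution(n):
--     seen_zero = False
--     for c in str(n):
--         if c == '0':
--             seen_zero = True
--         elif seen_zero:
--             return True
--     return False
-- ===== Notes on version B (the rewrite author's own statement) =====
-- stated objective: simpler
-- what changed: Replaced A's two sequential index scans (backward while-loop for the rightmost non-zero, then a forward range scan for a preceding zero) by one forward pass over the characters with a seen_zero accumulator that returns True at the first non-zero character after a zero.
import Mathlib
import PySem

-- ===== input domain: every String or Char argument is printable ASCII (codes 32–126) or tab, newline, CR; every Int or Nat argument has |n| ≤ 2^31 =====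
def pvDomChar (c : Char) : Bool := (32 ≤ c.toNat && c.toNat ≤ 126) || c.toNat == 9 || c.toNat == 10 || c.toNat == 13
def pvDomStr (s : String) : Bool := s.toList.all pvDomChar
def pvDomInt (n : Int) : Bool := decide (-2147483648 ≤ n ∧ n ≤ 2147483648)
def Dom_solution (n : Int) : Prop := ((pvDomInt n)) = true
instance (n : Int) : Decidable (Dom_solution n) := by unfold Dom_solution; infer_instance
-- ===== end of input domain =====

-- B is a single forward pass with a seen-zero accumulator instead of A's two sequential index scans; objective: simpler, same value everywhere.

-- ===== PORT A =====
-- A's backward while-loop looking for the rightmost non-zero character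
def awhile (s : List Char) (i : Int) : Int :=
  if h : 0 ≤ i ∧ PySem.List.pyGet? s i = some '0' then awhile s (i - 1) else i
termination_by (i + 1).toNat
decreasing_by omega

def solution (n : Int) : Bool :=
  let s := (PySem.Int.toStr n).toList
  let r := awhile s ((s.length : Int) - 1)
  -- for i in range(r): if s[i] == '0': return True ; return False
  (PySem.List.pyRange 0 r 1).any (fun i => PySem.List.pyGet? s i == some '0')

-- ===== PORT B =====
-- single forward pass carrying seen_zero
def bscan : List Char → Bool → Bool
  | [], _ => false
  | c :: rest, seen =>
    if c = '0' then bscan rest true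
    else if seen then true
    else bscan rest seen

def solution_alt (n : Int) : Bool := bscan (PySem.Int.toStr n).toList false

-- ===== PRECONDITION & SPEC =====
def Spec_solution (n : Int) (out : Bool) : Prop := out = solution_alt n
instance (n : Int) (out : Bool) : Decidable (Spec_solution n out) := by unfold Spec_solution; infer_instance

-- ===== CLAIM (what is proved, stated in full; the proofs are below) =====
def Claim_equal_solution : Prop := ∀ (n : Int), Dom_solution n → Spec_solution n (solution n)

-- ===== LEMMAS AND PROOFS =====

-- a non-'0' character occurs at position j
def NZat (s : List Char) (j : Nat) : Prop := ∃ c, s[j]? = some c ∧ c ≠ '0'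

-- a '0' occurs strictly before some non-'0' character
def GoodPair (s : List Char) : Prop :=
  ∃ i j : Nat, i < j ∧ s[i]? = some '0' ∧ NZat s j

lemma nzat_cons (c : Char) (rest : List Char) :
    (∃ j, NZat (c :: rest) j) ↔ c ≠ '0' ∨ ∃ j, NZat rest j := by
  constructor
  · rintro ⟨j, d, hd, hne⟩
    cases j with
    | zero => simp at hd; left; simpa [hd] using hne
    | succ k => right; exact ⟨k, d, by simpa using hd, hne⟩
  · rintro (h | ⟨j, d, hd, hne⟩)
    · exact ⟨0, c, by simp, h⟩
    · exact ⟨j + 1, d, by simpa using hd, hne⟩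

lemma goodpair_cons_zero (rest : List Char) :
    GoodPair ('0' :: rest) ↔ GoodPair rest ∨ ∃ j, NZat rest j := by
  constructor
  · rintro ⟨i, j, hij, hi, d, hd, hne⟩
    cases j with
    | zero => omega
    | succ k =>
      cases i with
      | zero => exact Or.inr ⟨k, d, by simpa using hd, hne⟩
      | succ m =>
        exact Or.inl ⟨m, k, by omega, by simpa using hi, d, by simpa using hd, hne⟩
  · rintro (⟨i, j, hij, hi, d, hd, hne⟩ | ⟨j, d, hd, hne⟩)
    · exact ⟨i + 1, j + 1, by omega, by simpa using hi, d, by simpa using hd, hne⟩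
    · exact ⟨0, j + 1, by omega, by simp, d, by simpa using hd, hne⟩

lemma goodpair_cons_nonzero (c : Char) (rest : List Char) (h : c ≠ '0') :
    GoodPair (c :: rest) ↔ GoodPair rest := by
  constructor
  · rintro ⟨i, j, hij, hi, d, hd, hne⟩
    cases i with
    | zero => simp at hi; exact absurd hi h
    | succ m =>
      cases j with
      | zero => omega
      | succ k =>
        exact ⟨m, k, by omega, by simpa using hi, d, by simpa using hd, hne⟩
  · rintro ⟨i, j, hij, hi, d, hd, hne⟩
    exact ⟨i + 1, j + 1, by omega, by simpa using hi, d, by simpa using hd, hne⟩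

lemma bscan_spec (s : List Char) :
    ∀ seen, bscan s seen = true ↔
      GoodPair s ∨ (seen = true ∧ ∃ j, NZat s j) := by
  induction s with
  | nil =>
    intro seen
    simp [bscan, GoodPair, NZat]
  | cons c rest ih =>
    intro seen
    by_cases hc : c = '0'
    · subst hc
      have hb : bscan ('0' :: rest) seen = bscan rest true := by simp [bscan]
      rw [hb, ih, goodpair_cons_zero, nzat_cons]
      constructor
      · rintro (h | ⟨_, h⟩) <;> tauto
      · rintro ((h | h) | ⟨hs, (h | h)⟩) <;> tauto
    · rw [goodpair_cons_nonzero c rest hc, nzat_cons]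
      by_cases hs : seen = true
      · have hb : bscan (c :: rest) seen = true := by simp [bscan, hc, hs]
        rw [hb]
        simp [hs, hc]
      · have hb : bscan (c :: rest) seen = bscan rest seen := by simp [bscan, hc, hs]
        rw [hb, ih]
        simp [hs]

lemma awhile_spec (s : List Char) (i : Int) :
    awhile s i ≤ i ∧
      (∀ k : Int, awhile s i < k → k ≤ i → PySem.List.pyGet? s k = some '0') ∧
      (0 ≤ awhile s i → PySem.List.pyGet? s (awhile s i) ≠ some '0') := by
  fun_induction awhile s i with
  | case1 i h ih =>
    obtain ⟨h1, h2, h3⟩ := ih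
    refine ⟨by omega, ?_, h3⟩
    intro k hk1 hk2
    rcases lt_or_eq_of_le hk2 with hlt | rfl
    · exact h2 k hk1 (by omega)
    · exact h.2
  | case2 i h =>
    refine ⟨le_refl _, fun k hk1 hk2 => by omega, fun h0 => ?_⟩
    intro hz
    exact h ⟨h0, hz⟩

lemma solution_eq_goodpair (n : Int) :
    solution n = true ↔ GoodPair (PySem.Int.toStr n).toList := by
  unfold solution
  set s := (PySem.Int.toStr n).toList with hs
  set r := awhile s ((s.length : Int) - 1) with hr
  obtain ⟨h1, h2, h3⟩ := awhile_spec s ((s.length : Int) - 1)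
  rw [← hr] at h1 h2 h3
  simp only [List.any_eq_true, PySem.List.mem_pyRange_one, beq_iff_eq]
  constructor
  · rintro ⟨k, ⟨hk0, hkr'⟩, hkz⟩
    have hkr : k < r := hkr'
    have hr0 : 0 ≤ r := by omega
    have hrlen : r < (s.length : Int) := by omega
    obtain ⟨c, hc⟩ : ∃ c, PySem.List.pyGet? s r = some c :=
      ⟨_, PySem.List.pyGet?_eq_some_getElem s hr0 hrlen⟩
    refine ⟨k.toNat, r.toNat, by omega, ?_, c, ?_, ?_⟩
    · rw [← PySem.List.pyGet?_of_nonneg s hk0]; exact hkz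
    · rw [← PySem.List.pyGet?_of_nonneg s hr0]; exact hc
    · intro hcz; subst hcz; exact h3 hr0 hc
  · rintro ⟨i, j, hij, hi, c, hj, hne⟩
    have hjlen : j < s.length := by
      by_contra hge
      simp [List.getElem?_eq_none (le_of_not_gt hge)] at hj
    have hjz : PySem.List.pyGet? s (j : Int) = some c := by
      rw [PySem.List.pyGet?_natCast s j]; exact hj
    have hjr : (j : Int) ≤ r := by
      by_contra hgt
      have := h2 (j : Int) (by omega) (by omega)
      rw [hjz] at this
      exact hne (by injection this)
    refine ⟨(i : Int), ⟨by omega, by omega⟩, ?_⟩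
    rw [PySem.List.pyGet?_natCast s i]; exact hi

lemma solution_alt_eq_goodpair (n : Int) :
    solution_alt n = true ↔ GoodPair (PySem.Int.toStr n).toList := by
  unfold solution_alt
  rw [bscan_spec]
  simp

-- ===== VERDICT (by name: the statement is the Claim_ definition above) =====
theorem solution_spec : Claim_equal_solution := by
  intro n _
  unfold Spec_solution
  rw [Bool.eq_iff_iff, solution_eq_goodpair, solution_alt_eq_goodpair]
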